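-- pv_equiv track=rewrite | github.com/seekerstart/seekerstart-hp | scripts/config_loader.py | get_player_league
-- ===== SOURCE A (Python) =====
-- def get_player_league(player_id: str, season: dict) -> str:
--     """プレイヤーのリーグを取得する（デフォルトはC）"""
--     leagues = season.get("leagues", {})
--     for league_name, members in leagues.items():
--         if player_id in members:
--             return league_name
--     # ワイルドカード "*" がある場合、そのリーグをデフォルトとする
--     for league_name, members in leagues.items():
--         if "*" in members:
--             return league_name
--     return "C"  # フォールバック
-- ===== SOURCE B (Python) =====
-- def get_player_league(player_id: str, season: dict) -> str:
--     """Single pass: return on direct membership, remember first wildcard league."""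
--     wildcard = None
--     for league_name, members in season.get("leagues", {}).items():
--         if player_id in members:
--             return league_name
--         if wildcard is None and "*" in members:
--             wildcard = league_name
--     return wildcard if wildcard is not None else "C"
-- ===== Notes on version B (the rewrite author's own statement) =====
-- stated objective: simpler
-- what changed: Replaces A's two separate scans over the leagues (member pass, then wildcard pass) by one pass that returns on a member match and remembers only the first wildcard league for after the loop.
import Mathlib
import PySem

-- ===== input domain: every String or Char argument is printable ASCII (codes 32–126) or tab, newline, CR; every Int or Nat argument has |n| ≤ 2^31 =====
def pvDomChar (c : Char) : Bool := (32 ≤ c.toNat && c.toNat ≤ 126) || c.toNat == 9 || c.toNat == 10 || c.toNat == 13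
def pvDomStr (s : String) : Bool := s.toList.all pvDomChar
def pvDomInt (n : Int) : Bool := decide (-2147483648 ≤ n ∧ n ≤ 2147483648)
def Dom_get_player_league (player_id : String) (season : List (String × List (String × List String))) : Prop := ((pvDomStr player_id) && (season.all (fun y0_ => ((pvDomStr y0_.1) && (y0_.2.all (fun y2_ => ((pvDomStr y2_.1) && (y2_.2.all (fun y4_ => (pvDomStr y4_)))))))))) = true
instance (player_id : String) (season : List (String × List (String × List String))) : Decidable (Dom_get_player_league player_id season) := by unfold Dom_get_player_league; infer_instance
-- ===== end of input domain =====

-- ===== PORT A =====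
-- B replaces A's two scans by one pass that defers the first wildcard league; return value only.
def pvFindMember (player_id : String) : List (String × List String) → Option String
  | [] => none
  | (n, ms) :: rest => if ms.contains player_id then some n else pvFindMember player_id rest

def pvFindWild : List (String × List String) → Option String
  | [] => none
  | (n, ms) :: rest => if ms.contains "*" then some n else pvFindWild rest

def get_player_league (player_id : String) (season : List (String × List (String × List String))) : String :=
  let leagues := PySem.Dict.getD ⟨season⟩ "leagues" []
  match pvFindMember player_id leagues with
  | some n => n
  | none =>
    match pvFindWild leagues with
    | some n => n
    | none => "C"

-- ===== PORT B =====
def pvOnePass (player_id : String) (wildcard : Option String) : List (String × List String) → String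
  | [] => match wildcard with
          | some w => w
          | none => "C"
  | (n, ms) :: rest =>
    if ms.contains player_id then n
    else pvOnePass player_id (if wildcard.isNone && ms.contains "*" then some n else wildcard) rest

def get_player_league_alt (player_id : String) (season : List (String × List (String × List String))) : String :=
  pvOnePass player_id none (PySem.Dict.getD ⟨season⟩ "leagues" [])

-- ===== PRECONDITION & SPEC =====
def Spec_get_player_league (player_id : String) (season : List (String × List (String × List String))) (out : String) : Prop := out = get_player_league_alt player_id season
instance (player_id : String) (season : List (String × List (String × List String))) (out : String) : Decidable (Spec_get_player_league player_id season out) := by unfold Spec_get_player_league; infer_instance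

-- ===== CLAIM (what is proved, stated in full; the proofs are below) =====
def Claim_equal_get_player_league : Prop := ∀ (player_id : String) (season : List (String × List (String × List String))), Dom_get_player_league player_id season → Spec_get_player_league player_id season (get_player_league player_id season)

-- ===== LEMMAS AND PROOFS =====
lemma pvOnePass_eq (player_id : String) (w : Option String) (ls : List (String × List String)) :
    pvOnePass player_id w ls =
      match pvFindMember player_id ls with
      | some n => n
      | none =>
        match w with
        | some u => u
        | none =>
          match pvFindWild ls with
          | some n => n
          | none => "C" := by
  induction ls generalizing w with
  | nil => cases w <;> simp [pvOnePass, pvFindMember, pvFindWild]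
  | cons p rest ih =>
    obtain ⟨n, ms⟩ := p
    by_cases hm : player_id ∈ ms
    · simp [pvOnePass, pvFindMember, hm]
    · by_cases hw : ("*" : String) ∈ ms
      · cases w <;> simp [pvOnePass, pvFindMember, pvFindWild, hm, hw, ih]
      · cases w <;> simp [pvOnePass, pvFindMember, pvFindWild, hm, hw, ih]

-- ===== VERDICT (by name: the statement is the Claim_ definition above) =====
theorem get_player_league_spec : Claim_equal_get_player_league := by
  intro player_id season _
  unfold Spec_get_player_league get_player_league get_player_league_alt
  rw [pvOnePass_eq]
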